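-- pv_equiv track=rewrite | github.com/mehkey/leetcode | python7/6328. Find the Substring With Maximum Cost.py | maximumCostSubstring
-- ===== SOURCE A (Python) =====
-- from typing import List
--
-- def maximumCostSubstring(s: str, chars: str, vals: List[int]) -> int:
--
--
--     l = 0
--     r = 0
--     N = len(s)
--     c = 0
--     m = 0
--
--     def val(ch):
--         if ch in chars:
--             return vals[chars.index(ch)]
--
--         return ord(ch) - ord('a') + 1
--
--     while r < N:
--
--         c += val(s[r])
--         r+=1
--
--         while c < 0 and l < r :
--             c -= val(s[l])
--             l+=1
--
--         m = max(m,c)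
--
--     return m
-- ===== SOURCE B (Python) =====
-- from typing import List
--
-- def maximumCostSubstring(s: str, chars: str, vals: List[int]) -> int:
--     # precompute first-occurrence char -> value map once, then one-pass Kadane
--     value = {}
--     for ch, v in zip(chars, vals):
--         if ch not in value:
--             value[ch] = v
--     cur = 0
--     best = 0
--     for ch in s:
--         cur += value.get(ch, ord(ch) - ord('a') + 1)
--         if cur < 0:
--             cur = 0
--         elif cur > best:
--             best = cur
--     return best
-- ===== Notes on version B (the rewrite author's own statement) =====
-- stated objective: faster
-- what changed: Replaces the two-pointer sliding window (with its inner shrink loop and a per-character linear scan of chars via 'in'/'index') by a dict built once from zip(chars, vals) plus a classic single-pass Kadane accumulator that clamps at zero.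
import Mathlib
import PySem

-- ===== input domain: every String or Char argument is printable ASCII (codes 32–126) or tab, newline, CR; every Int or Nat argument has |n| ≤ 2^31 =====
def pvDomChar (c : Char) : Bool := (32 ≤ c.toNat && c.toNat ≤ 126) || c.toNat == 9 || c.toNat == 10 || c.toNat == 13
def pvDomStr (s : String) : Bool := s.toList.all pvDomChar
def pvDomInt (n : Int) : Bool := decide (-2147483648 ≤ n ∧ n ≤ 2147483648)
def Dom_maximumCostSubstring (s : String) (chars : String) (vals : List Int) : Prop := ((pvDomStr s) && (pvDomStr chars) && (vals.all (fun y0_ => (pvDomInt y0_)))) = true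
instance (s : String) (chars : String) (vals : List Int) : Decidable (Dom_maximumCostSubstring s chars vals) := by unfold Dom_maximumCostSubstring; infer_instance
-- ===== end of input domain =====

-- B replaces A's two-pointer sliding window and per-character scans of `chars` by a
-- first-wins dict built once from zip(chars, vals) plus a single-pass Kadane accumulator.


-- ===== PORT A =====
-- val(ch): `vals[chars.index(ch)]` raises IndexError when the index is out of range;
-- that case is excluded by Pre_ below, the port returns a junk 0 there via getD.
def pvVal (chars : String) (vals : List Int) (ch : Char) : Int :=
  if ch ∈ chars.toList then
    ((PySem.List.index? chars.toList ch).bind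
      (fun i => PySem.List.pyGet? vals (Int.ofNat i))).getD 0
  else (ch.toNat : Int) - ('a'.toNat : Int) + 1

-- inner `while c < 0 and l < r:` loop; s[l] with 0 ≤ l < len(s) is exact as getD.
def pvInner (v : Char → Int) (t : List Char) (l r : Nat) (c : Int) : Nat × Int :=
  if _h : c < 0 ∧ l < r then pvInner v t (l + 1) r (c - v (t.getD l ' ')) else (l, c)
  termination_by r - l
  decreasing_by omega

-- outer `while r < N:` loop; s[r] with 0 ≤ r < N is exact as getD.
def pvOuter (v : Char → Int) (t : List Char) (l r : Nat) (c m : Int) : Int :=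
  if h : r < t.length then
    let c1 := c + v (t.getD r ' ')
    let p := pvInner v t l (r + 1) c1
    pvOuter v t p.1 (r + 1) p.2 (max m p.2)
  else m
  termination_by t.length - r
  decreasing_by omega

def maximumCostSubstring (s : String) (chars : String) (vals : List Int) : Int :=
  pvOuter (pvVal chars vals) s.toList 0 0 0 0

-- ===== PORT B =====
def maximumCostSubstring_alt (s : String) (chars : String) (vals : List Int) : Int :=
  let value := (chars.toList.zip vals).foldl
    (fun d p => if d.contains p.1 then d else d.insert p.1 p.2)
    (PySem.Dict.empty : PySem.Dict Char Int)
  (s.toList.foldl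
    (fun acc ch =>
      let cur := acc.1 + (value.get? ch).getD ((ch.toNat : Int) - ('a'.toNat : Int) + 1)
      if cur < 0 then (0, acc.2)
      else (cur, if cur > acc.2 then cur else acc.2))
    ((0 : Int), (0 : Int))).2

-- ===== PRECONDITION & SPEC =====
-- Pre_ excludes exactly the inputs where A raises IndexError: some character of s occurs
-- in chars but its first-occurrence index is out of range for vals.
def Pre_maximumCostSubstring (s : String) (chars : String) (vals : List Int) : Prop :=
  (s.toList.all (fun ch =>
    !(chars.toList.contains ch) || (chars.toList.take vals.length).contains ch)) = true
instance (s : String) (chars : String) (vals : List Int) : Decidable (Pre_maximumCostSubstring s chars vals) := by unfold Pre_maximumCostSubstring; infer_instance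

def pvWitness_maximumCostSubstring : String × String × List Int := ("a", "b", [7])

def Spec_maximumCostSubstring (s : String) (chars : String) (vals : List Int) (out : Int) : Prop := out = maximumCostSubstring_alt s chars vals
instance (s : String) (chars : String) (vals : List Int) (out : Int) : Decidable (Spec_maximumCostSubstring s chars vals out) := by unfold Spec_maximumCostSubstring; infer_instance

-- ===== CLAIM (what is proved, stated in full; the proofs are below) =====
def Claim_equal_maximumCostSubstring : Prop := ∀ (s : String) (chars : String) (vals : List Int), Dom_maximumCostSubstring s chars vals → Pre_maximumCostSubstring s chars vals → Spec_maximumCostSubstring s chars vals (maximumCostSubstring s chars vals)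

-- ===== LEMMAS AND PROOFS =====

-- sum of values over the window t[l:r]
def winSum (v : Char → Int) (t : List Char) (l r : Nat) : Int :=
  ∑ i ∈ Finset.Ico l r, v (t.getD i ' ')

theorem winSum_self (v : Char → Int) (t : List Char) (l : Nat) : winSum v t l l = 0 := by
  simp [winSum]

theorem winSum_bot (v : Char → Int) (t : List Char) {l r : Nat} (h : l < r) :
    winSum v t l r = v (t.getD l ' ') + winSum v t (l + 1) r := by
  simpa [winSum] using Finset.sum_eq_sum_Ico_succ_bot h (fun i => v (t.getD i ' '))

theorem winSum_top (v : Char → Int) (t : List Char) {l r : Nat} (h : l ≤ r) :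
    winSum v t l (r + 1) = winSum v t l r + v (t.getD r ' ') := by
  simpa [winSum] using Finset.sum_Ico_succ_top h (fun i => v (t.getD i ' '))

theorem pvInner_pos (v : Char → Int) (t : List Char) (l r : Nat) (c : Int) (h : 0 ≤ c) :
    pvInner v t l r c = (l, c) := by
  rw [pvInner]
  have : ¬ (c < 0 ∧ l < r) := by omega
  simp [this]

theorem pvInner_drain (v : Char → Int) (t : List Char) :
    ∀ (k l r : Nat) (c : Int), r - l = k → l ≤ r →
    (∀ j, l ≤ j → j < r → c - winSum v t l j < 0) →
    c = winSum v t l r →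
    pvInner v t l r c = (r, 0) := by
  intro k
  induction k with
  | zero =>
    intro l r c hk hlr _ hc
    have : l = r := by omega
    subst this
    rw [winSum_self] at hc
    rw [pvInner]
    have : ¬ (c < 0 ∧ l < l) := by omega
    simp [hc]
  | succ k ih =>
    intro l r c hk hlr hneg hc
    have hlt : l < r := by omega
    have hc0 : c < 0 := by
      have := hneg l le_rfl hlt
      simpa [winSum_self] using this
    rw [pvInner]
    simp only [hc0, hlt, and_self, dite_true]
    apply ih (l + 1) r (c - v (t.getD l ' ')) (by omega) (by omega)
    · intro j hj1 hj2
      have := hneg j (by omega) hj2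
      rw [winSum_bot v t (show l < j by omega)] at this
      omega
    · rw [hc, winSum_bot v t hlt]
      omega

theorem pvOuter_eq_kadane (v : Char → Int) (t : List Char) :
    ∀ (k l r : Nat) (c m : Int), t.length - r = k → l ≤ r → r ≤ t.length →
    (∀ j, l ≤ j → j ≤ r → 0 ≤ winSum v t l j) →
    c = winSum v t l r → 0 ≤ m →
    pvOuter v t l r c m =
      ((t.drop r).foldl
        (fun acc ch =>
          if acc.1 + v ch < 0 then ((0 : Int), acc.2)
          else (acc.1 + v ch, if acc.1 + v ch > acc.2 then acc.1 + v ch else acc.2))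
        (c, m)).2 := by
  intro k
  induction k with
  | zero =>
    intro l r c m hk _ hr _ _ _
    have hge : t.length ≤ r := by omega
    rw [pvOuter]
    have hnlt : ¬ (r < t.length) := by omega
    simp [hnlt, List.drop_eq_nil_of_le hge]
  | succ k ih =>
    intro l r c m hk hlr hr hP hc hm
    have hrlt : r < t.length := by omega
    have hget : t.getD r ' ' = t[r] := by
      simp [List.getD, List.getElem?_eq_getElem hrlt]
    have hdrop : t.drop r = t[r] :: t.drop (r + 1) := List.drop_eq_getElem_cons hrlt
    have hsum : c + v t[r] = winSum v t l (r + 1) := by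
      rw [winSum_top v t hlr, hget, ← hc]
    rw [pvOuter, dif_pos hrlt]
    simp only [hget]
    rw [hdrop]
    simp only [List.foldl_cons]
    by_cases hpos : 0 ≤ c + v t[r]
    · rw [pvInner_pos v t l (r + 1) _ hpos]
      have hcnlt : ¬ (c + v t[r] < 0) := by omega
      rw [if_neg hcnlt]
      have hmaxeq : (if c + v t[r] > m then c + v t[r] else m) = max m (c + v t[r]) := by
        split_ifs <;> omega
      rw [hmaxeq]
      exact ih l (r + 1) (c + v t[r]) (max m (c + v t[r])) (by omega) (by omega) (by omega)
        (fun j hj1 hj2 => by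
          rcases Nat.lt_or_ge j (r + 1) with hj | hj
          · exact hP j hj1 (by omega)
          · have hje : j = r + 1 := by omega
            subst hje; omega)
        hsum (by omega)
    · have hneg1 : c + v t[r] < 0 := by omega
      rw [pvInner_drain v t (r + 1 - l) l (r + 1) _ rfl (by omega)
        (fun j hj1 hj2 => by
          have h0 : 0 ≤ winSum v t l j := hP j hj1 (by omega)
          omega)
        hsum]
      rw [if_pos hneg1]
      show pvOuter v t (r + 1) (r + 1) 0 (max m 0) =
        ((t.drop (r + 1)).foldl
          (fun acc ch =>
            if acc.1 + v ch < 0 then ((0 : Int), acc.2)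
            else (acc.1 + v ch, if acc.1 + v ch > acc.2 then acc.1 + v ch else acc.2))
          (0, m)).2
      have hm0 : max m (0 : Int) = m := by omega
      rw [hm0]
      exact ih (r + 1) (r + 1) 0 m (by omega) le_rfl (by omega)
        (fun j hj1 hj2 => by
          have hje : j = r + 1 := by omega
          subst hje
          simp [winSum_self])
        (by rw [winSum_self]) hm

-- first-wins dict build: lookup is old dict first, then first match in the pair list
theorem getFW (ps : List (Char × Int)) :
    ∀ (d : PySem.Dict Char Int) (ch : Char),
    (ps.foldl (fun d p => if d.contains p.1 then d else d.insert p.1 p.2) d).get? ch =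
      (d.get? ch).or (ps.lookup ch) := by
  induction ps with
  | nil => intro d ch; simp
  | cons p ps ih =>
    intro d ch
    rw [List.foldl_cons]
    by_cases hcont : d.contains p.1
    · simp only [hcont, if_true]
      rw [ih d ch]
      by_cases he : p.1 = ch
      · subst he
        have hsome : (d.get? p.1).isSome := by
          rw [← PySem.Dict.contains_eq_isSome_get?]; exact hcont
        obtain ⟨w, hw⟩ := Option.isSome_iff_exists.mp hsome
        simp [hw, List.lookup]
      · have hbeq : (ch == p.1) = false := beq_eq_false_iff_ne.mpr (fun h => he h.symm)
        simp [List.lookup, hbeq]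
    · simp only [hcont, Bool.false_eq_true, if_false]
      rw [ih (d.insert p.1 p.2) ch]
      have hnone : d.get? p.1 = none := by
        cases hd : d.get? p.1 with
        | none => rfl
        | some w =>
          exact absurd (by rw [PySem.Dict.contains_eq_isSome_get?, hd]; rfl) hcont
      by_cases he : ch = p.1
      · subst he
        rw [PySem.Dict.get?_insert_self, hnone]
        simp [List.lookup]
      · rw [PySem.Dict.get?_insert_of_ne _ _ he]
        have hbeq : (ch == p.1) = false := beq_eq_false_iff_ne.mpr he
        simp [List.lookup, hbeq]

theorem lookup_zip (ch : Char) :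
    ∀ (cs : List Char) (vs : List Int),
    (cs.zip vs).lookup ch = (PySem.List.index? cs ch).bind (fun i => vs[i]?) := by
  intro cs
  induction cs with
  | nil => intro vs; simp [PySem.List.index?]
  | cons c cs ih =>
    intro vs
    cases vs with
    | nil =>
      simp only [List.zip_nil_right, List.lookup_nil]
      cases h : PySem.List.index? (c :: cs) ch <;> simp
    | cons w vs =>
      by_cases he : c = ch
      · subst he
        rw [PySem.List.index?_cons_self c cs]
        simp
      · have hbeq : (ch == c) = false := beq_eq_false_iff_ne.mpr (fun h => he h.symm)
        rw [PySem.List.index?_cons_of_ne cs he]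
        simp only [List.zip_cons_cons, List.lookup_cons]
        rw [ih vs]
        cases h : PySem.List.index? cs ch <;> simp [hbeq]

-- the first-occurrence index of a member of cs.take k is below k
theorem index?_lt_of_mem_take :
    ∀ (cs : List Char) (k : Nat) (ch : Char) (i : Nat),
    PySem.List.index? cs ch = some i → ch ∈ cs.take k → i < k := by
  intro cs
  induction cs with
  | nil => intro k ch i hi _; simp at hi
  | cons c cs ih =>
    intro k ch i hi hmem
    cases k with
    | zero => simp at hmem
    | succ k =>
      by_cases he : c = ch
      · subst he
        rw [PySem.List.index?_cons_self c cs] at hi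
        simp at hi
        omega
      · rw [PySem.List.index?_cons_of_ne cs he] at hi
        simp only [List.take_succ_cons, List.mem_cons] at hmem
        rcases hmem with h1 | h2
        · exact absurd h1.symm he
        · cases hj : PySem.List.index? cs ch with
          | none => rw [hj] at hi; simp at hi
          | some j =>
            rw [hj] at hi
            simp at hi
            have := ih k ch j hj h2
            omega

-- under Pre_, B's dict lookup computes A's val() for every character of s
theorem value_bridge (s chars : String) (vals : List Int)
    (hpre : Pre_maximumCostSubstring s chars vals) (ch : Char) (hch : ch ∈ s.toList) :
    (((chars.toList.zip vals).foldl
        (fun d p => if d.contains p.1 then d else d.insert p.1 p.2)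
        (PySem.Dict.empty : PySem.Dict Char Int)).get? ch).getD
      ((ch.toNat : Int) - ('a'.toNat : Int) + 1) = pvVal chars vals ch := by
  rw [getFW]
  simp only [PySem.Dict.get?_empty, Option.none_or]
  rw [lookup_zip]
  by_cases hmem : ch ∈ chars.toList
  · obtain ⟨i, hi⟩ := Option.isSome_iff_exists.mp
      ((PySem.List.index?_isSome_iff chars.toList ch).mpr hmem)
    have hilen : i < vals.length := by
      have hall := List.all_eq_true.mp hpre ch hch
      have hc : chars.toList.contains ch = true := by simpa using hmem
      rw [hc] at hall
      simp at hall
      exact index?_lt_of_mem_take chars.toList vals.length ch i hi (by simpa using hall)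
    rw [hi]
    simp only [Option.bind_some]
    rw [List.getElem?_eq_getElem hilen]
    unfold pvVal
    rw [if_pos hmem, hi]
    simp [PySem.List.pyGet?_natCast, List.getElem?_eq_getElem hilen]
  · have : PySem.List.index? chars.toList ch = none :=
      (PySem.List.index?_eq_none_iff chars.toList ch).mpr hmem
    rw [this]
    unfold pvVal
    rw [if_neg hmem]
    simp

-- ===== VERDICT (by name: the statement is the Claim_ definition above) =====
theorem maximumCostSubstring_spec : Claim_equal_maximumCostSubstring := by
  intro s chars vals _ hpre
  unfold Spec_maximumCostSubstring maximumCostSubstring maximumCostSubstring_alt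
  rw [pvOuter_eq_kadane (pvVal chars vals) s.toList (s.toList.length) 0 0 0 0 rfl
    le_rfl (Nat.zero_le _)
    (by
      intro j hj1 hj2
      have : j = 0 := by omega
      subst this
      simp [winSum_self])
    (by rw [winSum_self]) le_rfl]
  simp only [List.drop_zero]
  refine congrArg Prod.snd (PySem.List.foldl_congr_mem _ _ _ _ ?_)
  intro acc ch hch
  rw [value_bridge s chars vals hpre ch hch]
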